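-- pv_equiv track=rewrite | github.com/vickz86/pythonFunction | E_listPython.py | SeparateListAtEmptyLines
-- ===== SOURCE A (Python) =====
-- def SeparateListAtEmptyLines(theList: list) -> list:
--     """Separate the list at empty elements in the list, return a list of lists"""
--     # Declare the return list
--     returnList: list = []
--
--     # Create the temp list
--     tempList: list = []
--
--     for nb, element in enumerate(theList):
--         # Check if empty
--         if element == "":
--             if tempList:  # Only append non-empty tempList
--                 returnList.append(tempList)
--             tempList = []  # Reset tempList for the next sublist
--         else:
--             # If element is not empty, append to tempList
--             tempList.append(element)
--
--     # Add any remaining elements in tempList to returnList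
--     if tempList:
--         returnList.append(tempList)
--
--     return returnList
-- ===== SOURCE B (Python) =====
-- def SeparateListAtEmptyLines(theList: list) -> list:
--     """Separate the list at empty elements in the list, return a list of lists"""
--     result = []
--     n = len(theList)
--     i = 0
--     while i < n:
--         if theList[i] == "":
--             i += 1
--         else:
--             j = i
--             while j < n and theList[j] != "":
--                 j += 1
--             result.append(theList[i:j])
--             i = j
--     return result
-- ===== Notes on version B (the rewrite author's own statement) =====
-- stated objective: alternative
-- what changed: Replaces A's element-by-element pass with a tempList accumulator and a post-loop flush by an index scanner: skip separators, find the end of each non-empty run by index, and slice the whole run out at once; no temp accumulator and no trailing special case.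
import Mathlib
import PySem

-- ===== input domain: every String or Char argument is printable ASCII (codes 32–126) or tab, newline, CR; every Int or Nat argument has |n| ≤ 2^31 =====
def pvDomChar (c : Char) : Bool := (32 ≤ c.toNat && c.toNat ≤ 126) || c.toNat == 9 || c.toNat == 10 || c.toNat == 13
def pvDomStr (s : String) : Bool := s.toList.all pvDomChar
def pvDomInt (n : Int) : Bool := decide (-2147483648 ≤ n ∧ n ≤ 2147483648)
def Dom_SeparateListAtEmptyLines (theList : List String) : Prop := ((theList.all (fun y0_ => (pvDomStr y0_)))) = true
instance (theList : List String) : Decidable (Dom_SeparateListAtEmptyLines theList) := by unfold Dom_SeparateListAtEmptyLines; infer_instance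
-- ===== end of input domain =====

-- B replaces A's element-by-element pass (tempList accumulator + post-loop flush) by an
-- index scanner: skip separators, find each non-empty run's end, slice the run out at once.

-- ===== PORT A =====
-- the loop body: if element == "": (flush non-empty tempList, reset) else: append to tempList
def pvStepA (st : List (List String) × List String) (p : Int × String) :
    List (List String) × List String :=
  if p.2 == "" then
    ((if st.2.isEmpty then st.1 else st.1 ++ [st.2]), ([] : List String))
  else
    (st.1, st.2 ++ [p.2])

-- for nb, element in enumerate(theList): …; then the trailing flush of tempList
def SeparateListAtEmptyLines (theList : List String) : List (List String) :=
  let st := (PySem.List.enumerate theList 0).foldl pvStepA ([], [])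
  if st.2.isEmpty then st.1 else st.1 ++ [st.2]

-- ===== PORT B =====
-- inner while: j = i; while j < n and theList[j] != "": j += 1
-- (fuel n - j makes the loop structurally total; 'fuel > 0' is exactly 'j < n')
def pvRunEndAux (l : List String) : Nat → Nat → Nat
  | 0, j => j
  | fuel + 1, j =>
    if ¬ (PySem.List.pyGetD l (j : Int) "" == "") then pvRunEndAux l fuel (j + 1)
    else j

def pvRunEnd (l : List String) (n j : Nat) : Nat := pvRunEndAux l (n - j) j

-- outer while: skip a separator, or append theList[i:j] and jump to j
-- (fuel n suffices: i strictly increases every iteration; the real guard 'i < n' stays)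
def pvAltLoop (l : List String) (n : Nat) : Nat → Nat → List (List String) → List (List String)
  | 0, _, res => res
  | fuel + 1, i, res =>
    if i < n then
      if PySem.List.pyGetD l (i : Int) "" == "" then pvAltLoop l n fuel (i + 1) res
      else
        pvAltLoop l n fuel (pvRunEnd l n i)
          (res ++ [PySem.List.slice l (some (i : Int)) (some ((pvRunEnd l n i : Nat) : Int))])
    else res

def SeparateListAtEmptyLines_alt (theList : List String) : List (List String) :=
  pvAltLoop theList theList.length theList.length 0 []

-- ===== PRECONDITION & SPEC =====
def Spec_SeparateListAtEmptyLines (theList : List String) (out : List (List String)) : Prop := out = SeparateListAtEmptyLines_alt theList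
instance (theList : List String) (out : List (List String)) : Decidable (Spec_SeparateListAtEmptyLines theList out) := by unfold Spec_SeparateListAtEmptyLines; infer_instance

-- ===== CLAIM (what is proved, stated in full; the proofs are below) =====
def Claim_equal_SeparateListAtEmptyLines : Prop := ∀ (theList : List String), Dom_SeparateListAtEmptyLines theList → Spec_SeparateListAtEmptyLines theList (SeparateListAtEmptyLines theList)

-- ===== LEMMAS AND PROOFS =====

-- reference semantics: A's fold restated as a recursion with a pending run t
def pvGo : List String → List String → List (List String)
  | t, [] => if t.isEmpty then [] else [t]
  | t, x :: xs =>
      if x = "" then (if t.isEmpty then pvGo [] xs else t :: pvGo [] xs)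
      else pvGo (t ++ [x]) xs

theorem pvA_eq_go (l : List String) : ∀ (s : Int) (r : List (List String)) (t : List String),
    (let st := (PySem.List.enumerate l s).foldl pvStepA (r, t)
     if st.2.isEmpty then st.1 else st.1 ++ [st.2]) = r ++ pvGo t l := by
  induction l with
  | nil =>
    intro s r t
    simp only [PySem.List.enumerate_nil, List.foldl_nil, pvGo]
    by_cases h : t.isEmpty <;> simp [h]
  | cons x xs ih =>
    intro s r t
    simp only [PySem.List.enumerate_cons, List.foldl_cons]
    by_cases hx : x = ""
    · subst hx
      by_cases ht : t.isEmpty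
      · have hstep : pvStepA (r, t) (s, "") = (r, ([] : List String)) := by
          have : t = [] := by simpa using ht
          simp [pvStepA, this]
        rw [hstep, ih (s + 1) r []]
        simp [pvGo, ht]
      · have hstep : pvStepA (r, t) (s, "") = (r ++ [t], ([] : List String)) := by
          simp [pvStepA, ht]
        rw [hstep, ih (s + 1) (r ++ [t]) []]
        simp [pvGo, ht]
    · have hstep : pvStepA (r, t) (s, x) = (r, t ++ [x]) := by
        simp [pvStepA, hx]
      rw [hstep, ih (s + 1) r (t ++ [x])]
      simp [pvGo, hx]

theorem pvRunEndAux_ge (l : List String) : ∀ (fuel j : Nat), j ≤ pvRunEndAux l fuel j := by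
  intro fuel
  induction fuel with
  | zero => intro j; simp [pvRunEndAux]
  | succ fuel ih =>
    intro j
    rw [pvRunEndAux]
    split
    · exact Nat.le_trans (by omega) (ih (j + 1))
    · omega

theorem pvRunEndAux_le (l : List String) : ∀ (fuel j : Nat), pvRunEndAux l fuel j ≤ j + fuel := by
  intro fuel
  induction fuel with
  | zero => intro j; simp [pvRunEndAux]
  | succ fuel ih =>
    intro j
    rw [pvRunEndAux]
    split
    · exact Nat.le_trans (ih (j + 1)) (by omega)
    · omega

theorem pvRunEnd_step (l : List String) (n i : Nat) (hlt : i < n)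
    (hx : ¬ (PySem.List.pyGetD l (i : Int) "" == "")) :
    pvRunEnd l n i = pvRunEnd l n (i + 1) := by
  unfold pvRunEnd
  have he : n - i = (n - (i + 1)) + 1 := by omega
  rw [he, pvRunEndAux, if_pos hx]

theorem pvRunEnd_stop (l : List String) (n i : Nat)
    (h : n ≤ i ∨ (PySem.List.pyGetD l (i : Int) "" == "")) :
    pvRunEnd l n i = i := by
  unfold pvRunEnd
  rcases h with h | h
  · rw [show n - i = 0 by omega, pvRunEndAux]
  · cases hni : n - i with
    | zero => rw [pvRunEndAux]
    | succ k => rw [pvRunEndAux, if_neg (by simpa using h)]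

theorem pvRunEnd_ge (l : List String) (n i : Nat) : i ≤ pvRunEnd l n i :=
  pvRunEndAux_ge l (n - i) i

theorem pvRunEnd_le (l : List String) (n i : Nat) (h : i ≤ n) : pvRunEnd l n i ≤ n := by
  have := pvRunEndAux_le l (n - i) i
  unfold pvRunEnd
  omega

theorem pvGetD_eq (l : List String) (i : Nat) (hil : i < l.length) :
    PySem.List.pyGetD l (i : Int) "" = l[i] := by
  simp [PySem.List.pyGetD_natCast, List.getD_eq_getElem?_getD, List.getElem?_eq_getElem hil]

-- with a nonempty pending run, pvGo splits off exactly the run ending at pvRunEnd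
theorem pvGo_run (l : List String) (n : Nat) (hn : n = l.length) :
    ∀ (fuel i : Nat) (t : List String), i ≤ n → n - i ≤ fuel → ¬ t.isEmpty →
    pvGo t (l.drop i) =
      (t ++ (l.drop i).take (pvRunEnd l n i - i)) :: pvGo [] (l.drop (pvRunEnd l n i)) := by
  intro fuel
  induction fuel with
  | zero =>
    intro i t hi hf ht
    have hin : i = n := by omega
    have hd : l.drop i = [] := List.drop_eq_nil_of_le (by omega)
    have hre : pvRunEnd l n i = i := pvRunEnd_stop l n i (Or.inl (by omega))
    rw [hre]
    simp [hd, pvGo, ht]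
  | succ fuel ih =>
    intro i t hi hf ht
    rcases Nat.lt_or_ge i n with hlt | hge
    · have hil : i < l.length := by omega
      have hdrop : l.drop i = l[i] :: l.drop (i + 1) := (List.getElem_cons_drop hil).symm
      by_cases hx : PySem.List.pyGetD l (i : Int) "" == ""
      · -- separator at i: the run is empty, pvRunEnd stops at i
        have hxe : l[i] = "" := by simpa [pvGetD_eq l i hil] using hx
        have hre : pvRunEnd l n i = i := pvRunEnd_stop l n i (Or.inr hx)
        rw [hre]
        simp only [Nat.sub_self, List.take_zero, List.append_nil]
        conv_lhs => rw [hdrop]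
        conv_rhs => rw [hdrop]
        simp [pvGo, hxe, ht]
      · -- run continues through i
        have hxe : ¬ l[i] = "" := by
          intro hh; apply hx; simp [pvGetD_eq l i hil, hh]
        have hre : pvRunEnd l n i = pvRunEnd l n (i + 1) := pvRunEnd_step l n i hlt hx
        have hge1 : i + 1 ≤ pvRunEnd l n (i + 1) := pvRunEnd_ge l n (i + 1)
        rw [hdrop]
        simp only [pvGo, if_neg hxe]
        rw [ih (i + 1) (t ++ [l[i]]) (by omega) (by omega) (by simp), hre]
        have htake : (l[i] :: l.drop (i + 1)).take (pvRunEnd l n (i + 1) - i)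
            = l[i] :: (l.drop (i + 1)).take (pvRunEnd l n (i + 1) - (i + 1)) := by
          rw [show pvRunEnd l n (i + 1) - i = (pvRunEnd l n (i + 1) - (i + 1)) + 1 by omega,
            List.take_succ_cons]
        rw [htake]
        simp
    · have hin : i = n := by omega
      have hd : l.drop i = [] := List.drop_eq_nil_of_le (by omega)
      have hre : pvRunEnd l n i = i := pvRunEnd_stop l n i (Or.inl (by omega))
      rw [hre]
      simp [hd, pvGo, ht]

theorem pvLoop_eq_go (l : List String) (n : Nat) (hn : n = l.length) :
    ∀ (fuel i : Nat) (res : List (List String)), i ≤ n → n - i ≤ fuel →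
    pvAltLoop l n fuel i res = res ++ pvGo [] (l.drop i) := by
  intro fuel
  induction fuel with
  | zero =>
    intro i res hi hf
    have hd : l.drop i = [] := List.drop_eq_nil_of_le (by omega)
    rw [pvAltLoop]
    simp [hd, pvGo]
  | succ fuel ih =>
    intro i res hi hf
    rcases Nat.lt_or_ge i n with hlt | hge
    · have hil : i < l.length := by omega
      have hdrop : l.drop i = l[i] :: l.drop (i + 1) := (List.getElem_cons_drop hil).symm
      rw [pvAltLoop, if_pos hlt]
      by_cases hx : PySem.List.pyGetD l (i : Int) "" == ""
      · have hxe : l[i] = "" := by simpa [pvGetD_eq l i hil] using hx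
        rw [if_pos hx, ih (i + 1) res (by omega) (by omega), hdrop]
        simp [pvGo, hxe]
      · have hxe : ¬ l[i] = "" := by
          intro hh; apply hx; simp [pvGetD_eq l i hil, hh]
        have hre : pvRunEnd l n i = pvRunEnd l n (i + 1) := pvRunEnd_step l n i hlt hx
        have hge1 : i + 1 ≤ pvRunEnd l n (i + 1) := pvRunEnd_ge l n (i + 1)
        have hle : pvRunEnd l n i ≤ n := pvRunEnd_le l n i (by omega)
        rw [if_neg hx, ih (pvRunEnd l n i) _ (by omega) (by omega)]
        have hslice : PySem.List.slice l (some (i : Int)) (some ((pvRunEnd l n i : Nat) : Int))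
            = (l.drop i).take (pvRunEnd l n i - i) := PySem.List.slice_natCast l i (pvRunEnd l n i)
        have hrun : pvGo [] (l.drop i)
            = (([] : List String) ++ (l.drop i).take (pvRunEnd l n i - i))
              :: pvGo [] (l.drop (pvRunEnd l n i)) := by
          conv_lhs => rw [hdrop]
          simp only [pvGo, if_neg hxe, List.nil_append]
          rw [pvGo_run l n hn n (i + 1) [l[i]] (by omega) (by omega) (by simp), ← hre]
          have htake : (l.drop i).take (pvRunEnd l n i - i)
              = l[i] :: (l.drop (i + 1)).take (pvRunEnd l n i - (i + 1)) := by
            rw [hdrop, show pvRunEnd l n i - i = (pvRunEnd l n i - (i + 1)) + 1 by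
              rw [hre]; omega, List.take_succ_cons]
          rw [htake]
          simp [hre]
        rw [hslice, hrun]
        simp
    · rw [pvAltLoop, if_neg (by omega)]
      have hd : l.drop i = [] := List.drop_eq_nil_of_le (by omega)
      simp [hd, pvGo]

-- ===== VERDICT (by name: the statement is the Claim_ definition above) =====
theorem SeparateListAtEmptyLines_spec : Claim_equal_SeparateListAtEmptyLines := by
  intro l _
  unfold Spec_SeparateListAtEmptyLines SeparateListAtEmptyLines SeparateListAtEmptyLines_alt
  rw [pvLoop_eq_go l l.length rfl l.length 0 [] (by omega) (by omega)]
  simpa using pvA_eq_go l 0 [] []
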